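-- pv_equiv track=rewrite | github.com/CppDigest/cppa-brain-backend | pinecone_rag/preprocessor/mail_preprocessor.py | get_thread_info_from_content
-- ===== SOURCE A (Python) =====
-- from typing import List, Dict, Any, Optional
--
-- def get_thread_info_from_content(
--     mails: List[Dict[str, Any]]
-- ) -> Optional[Dict[str, Any]]:
--     """
--     Get thread information from content
--
--     Args:
--         thread_info: Existing thread info dict (optional)
--         message: First message in thread (optional)
--
--     Returns:
--         Dictionary with thread information or None if insufficient data
--     """
--     thread_info = {}
--     thread_info["thread_id"] = mails[0].get("thread_id", "")
--     thread_info["list_name"] = mails[0].get("list_name", "")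
--     thread_info["subject"] = mails[0].get("subject", "")
--     thread_info["sent_at"] = mails[0].get("sent_at", "")
--     for mail in mails:
--         thread_id = mail.get("thread_id", "")
--         msg_id = mail.get("msg_id", "")
--         if msg_id == thread_id:
--             thread_info["subject"] = mail.get("subject", "")
--             thread_info["sent_at"] = mail.get("sent_at", "")
--
--     return thread_info
-- ===== SOURCE B (Python) =====
-- def get_thread_info_from_content(mails):
--     head = mails[0]
--     info = {
--         "thread_id": head.get("thread_id", ""),
--         "list_name": head.get("list_name", ""),
--         "subject": head.get("subject", ""),
--         "sent_at": head.get("sent_at", ""),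
--     }
--     for mail in reversed(mails):
--         if mail.get("msg_id", "") == mail.get("thread_id", ""):
--             info["subject"] = mail.get("subject", "")
--             info["sent_at"] = mail.get("sent_at", "")
--             break
--     return info
-- ===== Notes on version B (the rewrite author's own statement) =====
-- stated objective: simpler
-- what changed: Instead of a forward pass that overwrites subject/sent_at on every matching mail, B scans the list in reverse and stops at the first mail whose msg_id equals its thread_id (the last forward match), taking subject/sent_at from it once.
import Mathlib
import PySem

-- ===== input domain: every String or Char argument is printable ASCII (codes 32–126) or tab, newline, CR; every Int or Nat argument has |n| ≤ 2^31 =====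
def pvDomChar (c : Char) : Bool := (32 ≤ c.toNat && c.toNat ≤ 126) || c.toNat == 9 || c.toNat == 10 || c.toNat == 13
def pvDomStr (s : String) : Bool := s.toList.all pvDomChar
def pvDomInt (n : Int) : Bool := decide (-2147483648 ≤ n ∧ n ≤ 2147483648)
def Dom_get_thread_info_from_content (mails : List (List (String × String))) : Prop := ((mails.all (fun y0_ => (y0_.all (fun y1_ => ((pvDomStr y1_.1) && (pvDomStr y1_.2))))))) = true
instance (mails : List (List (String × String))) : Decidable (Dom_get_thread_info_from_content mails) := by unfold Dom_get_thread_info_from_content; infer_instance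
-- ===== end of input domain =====

-- B differs from A by decomposition: A's forward overwrite loop becomes a reversed early-exit scan for the last matching mail; return-value equivalence only.

-- shared transliteration of Python's mail.get(k, "") on an association list (dict -> first match)
def pvGet (m : List (String × String)) (k d : String) : String := (m.lookup k).getD d

-- ===== PORT A =====
def get_thread_info_from_content (mails : List (List (String × String))) : List (String × String) :=
  match mails with
  | [] => []   -- Python raises IndexError on mails[0]; excluded by Pre_
  | m0 :: _ =>
    let d0 := ((((PySem.Dict.empty).insert "thread_id" (pvGet m0 "thread_id" "")).insert
        "list_name" (pvGet m0 "list_name" "")).insert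
        "subject" (pvGet m0 "subject" "")).insert "sent_at" (pvGet m0 "sent_at" "")
    let d := mails.foldl (fun d mail =>
      let thread_id := pvGet mail "thread_id" ""
      let msg_id := pvGet mail "msg_id" ""
      if msg_id == thread_id then
        (d.insert "subject" (pvGet mail "subject" "")).insert "sent_at" (pvGet mail "sent_at" "")
      else d) d0
    d.items

-- ===== PORT B =====
def get_thread_info_from_content_alt (mails : List (List (String × String))) : List (String × String) :=
  match mails with
  | [] => []   -- Python raises IndexError on mails[0]; excluded by Pre_
  | m0 :: _ =>
    -- reversed(mails) with break = first match of the reversed list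
    let src := (mails.reverse.find? (fun m => pvGet m "msg_id" "" == pvGet m "thread_id" "")).getD m0
    [("thread_id", pvGet m0 "thread_id" ""), ("list_name", pvGet m0 "list_name" ""),
     ("subject", pvGet src "subject" ""), ("sent_at", pvGet src "sent_at" "")]

-- ===== PRECONDITION & SPEC =====
-- Pre_ excludes exactly the empty list, on which Python A raises IndexError at mails[0].
def Pre_get_thread_info_from_content (mails : List (List (String × String))) : Prop := mails ≠ []
instance (mails : List (List (String × String))) : Decidable (Pre_get_thread_info_from_content mails) := by unfold Pre_get_thread_info_from_content; infer_instance
def pvWitness_get_thread_info_from_content : (List (List (String × String))) :=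
  [[("thread_id", "t1"), ("msg_id", "t1"), ("subject", "s"), ("sent_at", "2024")]]
def Spec_get_thread_info_from_content (mails : List (List (String × String))) (out : List (String × String)) : Prop := out = get_thread_info_from_content_alt mails
instance (mails : List (List (String × String))) (out : List (String × String)) : Decidable (Spec_get_thread_info_from_content mails out) := by unfold Spec_get_thread_info_from_content; infer_instance

-- ===== CLAIM (what is proved, stated in full; the proofs are below) =====
def Claim_equal_get_thread_info_from_content : Prop := ∀ (mails : List (List (String × String))), Dom_get_thread_info_from_content mails → Pre_get_thread_info_from_content mails → Spec_get_thread_info_from_content mails (get_thread_info_from_content mails)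

-- ===== LEMMAS AND PROOFS =====

def pvStep (d : PySem.Dict String String) (mail : List (String × String)) : PySem.Dict String String :=
  if pvGet mail "msg_id" "" == pvGet mail "thread_id" "" then
    (d.insert "subject" (pvGet mail "subject" "")).insert "sent_at" (pvGet mail "sent_at" "")
  else d

def pvMatch (m : List (String × String)) : Bool := pvGet m "msg_id" "" == pvGet m "thread_id" ""

-- core invariant: folding A's overwrite step over any mail list, starting from the seeded 4-key
-- dict, yields exactly the 4-pair list with subject/sent_at taken from the last matching mail.
theorem pv_foldl_items (a b : String) :
    ∀ (ms : List (List (String × String))) (s t : String),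
    (ms.foldl pvStep (PySem.Dict.mk [("thread_id", a), ("list_name", b), ("subject", s), ("sent_at", t)])).items
      = [("thread_id", a), ("list_name", b),
         ("subject", match ms.reverse.find? pvMatch with | none => s | some m => pvGet m "subject" ""),
         ("sent_at", match ms.reverse.find? pvMatch with | none => t | some m => pvGet m "sent_at" "")] := by
  intro ms
  induction ms with
  | nil => intro s t; rfl
  | cons m rest ih =>
    intro s t
    by_cases hm : pvMatch m = true
    · have hstep : pvStep (PySem.Dict.mk [("thread_id", a), ("list_name", b), ("subject", s), ("sent_at", t)]) m
          = PySem.Dict.mk [("thread_id", a), ("list_name", b),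
              ("subject", pvGet m "subject" ""), ("sent_at", pvGet m "sent_at" "")] := by
        simp [pvStep, pvMatch] at hm ⊢
        simp [hm, PySem.Dict.insert]
      rw [List.foldl_cons, hstep, ih]
      rcases hfind : rest.reverse.find? pvMatch with _ | m'
      · simp [List.reverse_cons, List.find?_append, hfind, hm]
      · simp [List.reverse_cons, List.find?_append, hfind]
    · have hstep : pvStep (PySem.Dict.mk [("thread_id", a), ("list_name", b), ("subject", s), ("sent_at", t)]) m
          = PySem.Dict.mk [("thread_id", a), ("list_name", b), ("subject", s), ("sent_at", t)] := by
        simp [pvStep, pvMatch] at hm ⊢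
        simp [hm]
      rw [List.foldl_cons, hstep, ih]
      rcases hfind : rest.reverse.find? pvMatch with _ | m'
      · simp [List.reverse_cons, List.find?_append, hfind, hm]
      · simp [List.reverse_cons, List.find?_append, hfind]

-- ===== VERDICT (by name: the statement is the Claim_ definition above) =====
theorem get_thread_info_from_content_spec : Claim_equal_get_thread_info_from_content := by
  intro mails _ hpre
  unfold Spec_get_thread_info_from_content
  match mails with
  | [] => exact absurd rfl hpre
  | m0 :: rest =>
    unfold get_thread_info_from_content
    have hseed : ((((PySem.Dict.empty).insert "thread_id" (pvGet m0 "thread_id" "")).insert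
        "list_name" (pvGet m0 "list_name" "")).insert
        "subject" (pvGet m0 "subject" "")).insert "sent_at" (pvGet m0 "sent_at" "")
        = PySem.Dict.mk [("thread_id", pvGet m0 "thread_id" ""), ("list_name", pvGet m0 "list_name" ""),
            ("subject", pvGet m0 "subject" ""), ("sent_at", pvGet m0 "sent_at" "")] := by
      simp [PySem.Dict.insert, PySem.Dict.empty]
    have hfold : (fun (d : PySem.Dict String String) (mail : List (String × String)) =>
        let thread_id := pvGet mail "thread_id" ""
        let msg_id := pvGet mail "msg_id" ""
        if msg_id == thread_id then
          (d.insert "subject" (pvGet mail "subject" "")).insert "sent_at" (pvGet mail "sent_at" "")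
        else d) = pvStep := by
      funext d mail; simp [pvStep]
    rw [hfold]
    dsimp only
    rw [hseed, pv_foldl_items]
    unfold get_thread_info_from_content_alt
    dsimp only
    have hp : (fun (m : List (String × String)) => pvGet m "msg_id" "" == pvGet m "thread_id" "") = pvMatch := rfl
    rw [hp]
    rcases hfind : (m0 :: rest).reverse.find? pvMatch with _ | m'
    · simp
    · simp [hfind]
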